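-- pv_equiv track=rewrite | github.com/sharathkumar49/learning | Python programs/LeetCodeSolutions/2067.NumberofEqualCountSubstrings.py | equalCountSubstrings
-- ===== SOURCE A (Python) =====
-- def equalCountSubstrings(s):
--     n = len(s)
--     res = 0
--     for i in range(n):
--         count = [0]*26
--         for j in range(i, n):
--             count[ord(s[j])-97] += 1
--             vals = [x for x in count if x > 0]
--             if len(set(vals)) == 1:
--                 res += 1
--     return res
-- ===== SOURCE B (Python) =====
-- def equalCountSubstrings(s):
--     n = len(s)
--     res = 0
--     for k in range(1, 27):
--         for f in range(1, n // k + 1):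
--             L = k * f
--             cnt = [0] * 26
--             distinct = 0
--             exact = 0
--             for r in range(L):
--                 j = ord(s[r]) - 97
--                 v = cnt[j] + 1
--                 cnt[j] = v
--                 if v == 1:
--                     distinct += 1
--                 if v == f:
--                     exact += 1
--                 elif v == f + 1:
--                     exact -= 1
--             if distinct == k and exact == k:
--                 res += 1
--             for i in range(1, n - L + 1):
--                 j = ord(s[i - 1]) - 97
--                 v = cnt[j]
--                 cnt[j] = v - 1
--                 if v == 1:
--                     distinct -= 1
--                 if v == f:
--                     exact -= 1
--                 elif v == f + 1:
--                     exact += 1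
--                 j = ord(s[i + L - 1]) - 97
--                 v = cnt[j] + 1
--                 cnt[j] = v
--                 if v == 1:
--                     distinct += 1
--                 if v == f:
--                     exact += 1
--                 elif v == f + 1:
--                     exact -= 1
--                 if distinct == k and exact == k:
--                     res += 1
--     return res
-- ===== Notes on version B (the rewrite author's own statement) =====
-- stated objective: alternative
-- what changed: Instead of A's per-start extension of substrings with a full 26-slot rescan and a set build at every step, B enumerates, for each pair (k = distinct-count 1..26, f = common frequency), the fixed-length k*f windows with one sliding counter array and two O(1)-maintained counters (classes present, classes at frequency f); each equal-count substring is counted exactly once via its unique (k, f) pair.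
import Mathlib
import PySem

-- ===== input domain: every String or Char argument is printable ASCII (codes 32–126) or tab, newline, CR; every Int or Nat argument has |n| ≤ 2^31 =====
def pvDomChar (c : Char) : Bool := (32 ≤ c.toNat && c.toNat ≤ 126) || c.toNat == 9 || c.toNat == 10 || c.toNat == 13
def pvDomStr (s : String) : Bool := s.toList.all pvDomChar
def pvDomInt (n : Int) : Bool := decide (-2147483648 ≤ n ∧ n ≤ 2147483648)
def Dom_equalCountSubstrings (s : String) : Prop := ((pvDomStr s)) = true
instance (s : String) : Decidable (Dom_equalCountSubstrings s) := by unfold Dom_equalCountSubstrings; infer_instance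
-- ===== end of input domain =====

-- B counts the same substrings by a different enumeration: for each pair (k = distinct-count 1..26,
-- f = common frequency) it slides a window of the FIXED length k*f across the string, maintaining
-- the letter counts plus two O(1) counters (classes present / classes at frequency f), instead of
-- A's per-start extension of substrings with a 26-slot rescan and a set build at every step.
-- (Equivalence is about the return value; neither program mutates its argument.)

-- ===== PORT A =====
-- inner-loop body of A: count[ord(s[j])-97] += 1; vals = [x for x in count if x > 0]; if len(set(vals)) == 1: res += 1
def pvBodyA (cs : List Char) (st : List Int × Int) (j : Int) : List Int × Int :=
  let c := PySem.List.pyGetD cs j ' '      -- s[j]; j ∈ [i, n) is always in range in A's loops, so the default is never read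
  let idx : Int := (c.toNat : Int) - 97    -- ord(s[j]) - 97
  let count := PySem.List.pySetD st.1 idx (PySem.List.pyGetD st.1 idx 0 + 1)   -- count[idx] += 1 (idx in [-26,25] under Pre_)
  let vals := count.filter (fun x => decide (x > 0))
  (count, if PySem.Set.len (PySem.Set.ofList vals) == 1 then st.2 + 1 else st.2)

def equalCountSubstrings (s : String) : Int :=
  let cs := s.toList
  let n : Int := PySem.List.len cs
  (PySem.List.pyRange 0 n).foldl
    (fun res i => ((PySem.List.pyRange i n).foldl (pvBodyA cs) (List.replicate 26 (0 : Int), res)).2) 0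

-- ===== PORT B =====
-- body of B's 'add one character' block: j = ord(c)-97; v = cnt[j]+1; cnt[j] = v;
-- if v == 1: distinct += 1; if v == f: exact += 1 elif v == f+1: exact -= 1
def pvAddC (f : Int) (st : List Int × Int × Int) (c : Char) : List Int × Int × Int :=
  let j : Int := (c.toNat : Int) - 97
  let v := PySem.List.pyGetD st.1 j 0 + 1
  let cnt := PySem.List.pySetD st.1 j v
  let d := if v == 1 then st.2.1 + 1 else st.2.1
  let e := if v == f then st.2.2 + 1 else if v == f + 1 then st.2.2 - 1 else st.2.2
  (cnt, d, e)

-- body of B's 'remove one character' block: j = ord(o)-97; v = cnt[j]; cnt[j] = v-1;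
-- if v == 1: distinct -= 1; if v == f: exact -= 1 elif v == f+1: exact += 1
def pvRemC (f : Int) (st : List Int × Int × Int) (o : Char) : List Int × Int × Int :=
  let j : Int := (o.toNat : Int) - 97
  let v := PySem.List.pyGetD st.1 j 0
  let cnt := PySem.List.pySetD st.1 j (v - 1)
  let d := if v == 1 then st.2.1 - 1 else st.2.1
  let e := if v == f then st.2.2 - 1 else if v == f + 1 then st.2.2 + 1 else st.2.2
  (cnt, d, e)

def pvBuildStepB (cs : List Char) (f : Int) (st : List Int × Int × Int) (r : Int) :
    List Int × Int × Int :=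
  pvAddC f st (PySem.List.pyGetD cs r ' ')

def pvSlideStepB (cs : List Char) (L k f : Int) (st : List Int × Int × Int × Int) (i : Int) :
    List Int × Int × Int × Int :=
  let st1 := pvRemC f (st.1, st.2.1, st.2.2.1) (PySem.List.pyGetD cs (i - 1) ' ')
  let st2 := pvAddC f st1 (PySem.List.pyGetD cs (i + L - 1) ' ')
  (st2.1, st2.2.1, st2.2.2,
    if st2.2.1 == k && st2.2.2 == k then st.2.2.2 + 1 else st.2.2.2)

-- one (k, f) pass: build the counters of the first window of length L = k*f, then slide
def pvInnerB (cs : List Char) (k f res : Int) : Int :=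
  let n : Int := PySem.List.len cs
  let L := k * f
  let st0 := (PySem.List.pyRange 0 L).foldl (pvBuildStepB cs f) (List.replicate 26 (0 : Int), 0, 0)
  let res1 := if st0.2.1 == k && st0.2.2 == k then res + 1 else res
  ((PySem.List.pyRange 1 (n - L + 1)).foldl (pvSlideStepB cs L k f) (st0.1, st0.2.1, st0.2.2, res1)).2.2.2

def equalCountSubstrings_alt (s : String) : Int :=
  let cs := s.toList
  let n : Int := PySem.List.len cs
  (PySem.List.pyRange 1 27).foldl (fun res k =>
    (PySem.List.pyRange 1 (PySem.Int.floordiv n k + 1)).foldl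
      (fun res f => pvInnerB cs k f res) res) 0

-- ===== PRECONDITION & SPEC =====
-- Pre_ excludes exactly the strings with a character of code < 71 or > 122, on which both Pythons
-- raise IndexError from cnt[ord(c)-97] (a 26-element list only accepts indices in [-26, 25]).
def Pre_equalCountSubstrings (s : String) : Prop :=
  (s.toList.all (fun c => decide (71 ≤ c.toNat) && decide (c.toNat ≤ 122))) = true

instance (s : String) : Decidable (Pre_equalCountSubstrings s) := by
  unfold Pre_equalCountSubstrings; infer_instance

def pvWitness_equalCountSubstrings : String := "abcabc"

def Spec_equalCountSubstrings (s : String) (out : Int) : Prop := out = equalCountSubstrings_alt s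
instance (s : String) (out : Int) : Decidable (Spec_equalCountSubstrings s out) := by
  unfold Spec_equalCountSubstrings; infer_instance

-- ===== CLAIM (what is proved, stated in full; the proofs are below) =====
def Claim_equal_equalCountSubstrings : Prop := ∀ (s : String), Dom_equalCountSubstrings s → Pre_equalCountSubstrings s → Spec_equalCountSubstrings s (equalCountSubstrings s)

-- ===== LEMMAS AND PROOFS =====

-- ---------- shared spec-level vocabulary (letter classes 0..25, as both programs count them) ----------

def pvPos (c : Char) : Nat := if c.toNat < 97 then c.toNat - 71 else c.toNat - 97

-- the window s[i : i+L]
def pvWin (cs : List Char) (i L : Nat) : List Char := (cs.drop i).take L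

-- the 26 class counts of a window (what A's count array and B's cnt array hold)
def pvCnts (q : List Char) : List Int :=
  (List.range 26).map (fun t => ((q.countP (fun c => pvPos c == t)) : Int))

-- A's window check: the positive class counts form a one-element set
def pvGoodA (cnt : List Int) : Bool :=
  PySem.Set.len (PySem.Set.ofList (cnt.filter (fun x => decide (x > 0)))) == 1

-- B's two maintained counters
def pvDistC (q : List Char) : Int := ((pvCnts q).countP (fun x => decide (0 < x)) : Int)
def pvExactC (q : List Char) (f : Int) : Int := ((pvCnts q).countP (fun x => x == f) : Int)

-- B's window check
def pvQb (q : List Char) (k f : Int) : Bool := (pvDistC q == k) && (pvExactC q f == k)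

-- canonical counting of A: over all start positions i and lengths t+1
def pvRhs (cs : List Char) : Int :=
  ∑ i ∈ Finset.range cs.length, ∑ t ∈ Finset.range (cs.length - i),
    (if pvGoodA (pvCnts (pvWin cs i (t+1))) then (1:Int) else 0)

-- canonical counting of B: over pairs (k, f) and window starts
def pvLhs (cs : List Char) : Int :=
  ∑ k ∈ Finset.Icc 1 26, ∑ f ∈ Finset.Icc 1 (cs.length / k),
    ∑ i ∈ Finset.range (cs.length - k*f + 1),
      (if pvQb (pvWin cs i (k*f)) (k:Int) (f:Int) then (1:Int) else 0)

-- ---------- Pre_ gives the character bounds ----------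

lemma pre_bounds (s : String) (hpre : Pre_equalCountSubstrings s) :
    ∀ c ∈ s.toList, 71 ≤ c.toNat ∧ c.toNat ≤ 122 := by
  unfold Pre_equalCountSubstrings at hpre
  rw [List.all_eq_true] at hpre
  intro c hc
  have := hpre c hc
  rw [Bool.and_eq_true, decide_eq_true_eq, decide_eq_true_eq] at this
  exact this

lemma pvPos_lt (c : Char) (h1 : 71 ≤ c.toNat) (h2 : c.toNat ≤ 122) : pvPos c < 26 := by
  unfold pvPos
  split <;> omega

-- ---------- Python wraparound indexing into a 26-slot array lands on pvPos ----------

lemma pyGet_class (cnt : List Int) (hlen : cnt.length = 26) (c : Char)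
    (h1 : 71 ≤ c.toNat) (h2 : c.toNat ≤ 122) :
    PySem.List.pyGetD cnt ((c.toNat : Int) - 97) 0 = cnt.getD (pvPos c) 0 := by
  unfold pvPos
  simp only [PySem.List.pyGetD, PySem.List.pyGet?, PySem.List.pyIdx?, hlen]
  split_ifs with ha hb hc
  all_goals try (exfalso; omega)
  · have hk : ((c.toNat : Int) - 97).toNat = c.toNat - 97 := by omega
    simp only [hk, Option.bind_some]
    rw [List.getElem?_eq_getElem (l := cnt) (i := c.toNat - 97) (by omega),
      List.getD_eq_getElem _ _ (by omega)]
    rfl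
  · have hk : 26 - (-(((c.toNat : Int)) - 97)).toNat = c.toNat - 71 := by omega
    simp only [hk, Option.bind_some]
    rw [List.getElem?_eq_getElem (l := cnt) (i := c.toNat - 71) (by omega),
      List.getD_eq_getElem _ _ (by omega)]
    rfl

lemma pySet_class (cnt : List Int) (hlen : cnt.length = 26) (c : Char)
    (h1 : 71 ≤ c.toNat) (h2 : c.toNat ≤ 122) (e : Int) :
    PySem.List.pySetD cnt ((c.toNat : Int) - 97) e = cnt.set (pvPos c) e := by
  unfold pvPos
  simp only [PySem.List.pySetD, PySem.List.pySet?, PySem.List.pyIdx?, hlen]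
  split_ifs with ha hb hc
  all_goals try (exfalso; omega)
  · have hk : ((c.toNat : Int) - 97).toNat = c.toNat - 97 := by omega
    simp only [hk]
    rfl
  · have hk : 26 - (-(((c.toNat : Int)) - 97)).toNat = c.toNat - 71 := by omega
    simp only [hk]
    rfl

-- ---------- A-side: abstract step (definitional repackaging of pvBodyA) ----------

def pvStepA (cnt : List Int) (c : Char) : List Int :=
  PySem.List.pySetD cnt ((c.toNat : Int) - 97) (PySem.List.pyGetD cnt ((c.toNat : Int) - 97) 0 + 1)

def pvStepASt (st : List Int × Int) (c : Char) : List Int × Int :=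
  (pvStepA st.1 c, if pvGoodA (pvStepA st.1 c) then st.2 + 1 else st.2)

def pvArr (q : List Char) : List Int := q.foldl pvStepA (List.replicate 26 0)

def pvGA : List Int → List Char → Int
  | _, [] => 0
  | cnt, c :: w => (if pvGoodA (pvStepA cnt c) then 1 else 0) + pvGA (pvStepA cnt c) w

lemma foldA_snd (w : List Char) : ∀ (cnt : List Int) (r : Int),
    (w.foldl pvStepASt (cnt, r)).2 = r + pvGA cnt w := by
  induction w with
  | nil => intro cnt r; simp [pvGA]
  | cons c w ih =>
    intro cnt r
    simp only [List.foldl_cons, pvGA]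
    rw [show pvStepASt (cnt, r) c = (pvStepA cnt c, if pvGoodA (pvStepA cnt c) then r + 1 else r) from rfl]
    rw [ih]
    by_cases h : pvGoodA (pvStepA cnt c) = true
    · simp only [h, if_true]; omega
    · simp only [Bool.not_eq_true] at h; simp only [h, Bool.false_eq_true, if_false]; omega

lemma A_eq_sum (s : String) :
    equalCountSubstrings s =
      (PySem.List.pyRange 0 (PySem.List.len s.toList)).foldl
        (fun res i => res + pvGA (List.replicate 26 0) (s.toList.drop i.toNat)) 0 := by
  unfold equalCountSubstrings
  refine PySem.List.foldl_congr_mem _ _ _ _ ?_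
  intro acc i hi
  have h0 : (0:Int) ≤ i := (PySem.List.mem_pyRange_one.1 hi).1
  have hb : ∀ (st : List Int × Int) (j : Int), pvBodyA s.toList st j = pvStepASt st (PySem.List.pyGetD s.toList j ' ') := fun _ _ => rfl
  calc ((PySem.List.pyRange i (PySem.List.len s.toList)).foldl (pvBodyA s.toList) (List.replicate 26 (0:Int), acc)).2
      = ((PySem.List.pyRange i (PySem.List.len s.toList)).foldl
          (fun st j => pvStepASt st (PySem.List.pyGetD s.toList j ' ')) (List.replicate 26 (0:Int), acc)).2 := by
        rw [PySem.List.foldl_congr_mem _ _ _ _ (fun st j _ => hb st j)]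
    _ = (((s.toList.drop i.toNat)).foldl pvStepASt (List.replicate 26 (0:Int), acc)).2 := by
        rw [PySem.List.foldl_pyRange_pyGetD s.toList ' ' pvStepASt _ h0]
    _ = acc + pvGA (List.replicate 26 0) (s.toList.drop i.toNat) := foldA_snd _ _ _

lemma stepA_char (cnt : List Int) (hlen : cnt.length = 26) (c : Char)
    (h1 : 71 ≤ c.toNat) (h2 : c.toNat ≤ 122) :
    pvStepA cnt c = cnt.set (pvPos c) (cnt.getD (pvPos c) 0 + 1) := by
  unfold pvStepA
  rw [pyGet_class cnt hlen c h1 h2, pySet_class cnt hlen c h1 h2]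

lemma pvCnts_len (q : List Char) : (pvCnts q).length = 26 := by simp [pvCnts]

lemma pvCnts_nil : pvCnts [] = List.replicate 26 0 := by
  simp [pvCnts, List.eq_replicate_iff]

lemma getD_pvCnts (q : List Char) (c : Char) (h1 : 71 ≤ c.toNat) (h2 : c.toNat ≤ 122) :
    (pvCnts q).getD (pvPos c) 0 = ((q.countP (fun c' => pvPos c' == pvPos c)) : Int) := by
  have hpos : pvPos c < 26 := pvPos_lt c h1 h2
  rw [List.getD_eq_getElem _ _ (by rw [pvCnts_len]; exact hpos)]
  simp [pvCnts]

lemma pvCnts_append (q : List Char) (c : Char) (h1 : 71 ≤ c.toNat) (h2 : c.toNat ≤ 122) :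
    pvCnts (q ++ [c]) = (pvCnts q).set (pvPos c) ((pvCnts q).getD (pvPos c) 0 + 1) := by
  have hpos : pvPos c < 26 := pvPos_lt c h1 h2
  apply List.ext_getElem
  · simp [pvCnts]
  intro t ht _
  simp only [pvCnts, List.length_map, List.length_range] at ht
  have hget : ∀ (p : List Char) (u : Nat) (hu : u < 26),
      (pvCnts p)[u]'(by rw [pvCnts_len]; exact hu) = ((p.countP (fun c => pvPos c == u)) : Int) := by
    intro p u hu
    simp [pvCnts]
  rw [hget (q ++ [c]) t ht]
  by_cases he : t = pvPos c
  · subst he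
    rw [List.getElem_set_self]
    · rw [List.getD_eq_getElem _ _ (by simp [pvCnts_len, hpos]), hget q _ hpos,
        List.countP_append]
      simp [List.countP_cons]
  · rw [List.getElem_set_ne (by omega)]
    rw [hget q t ht, List.countP_append]
    have : ([c].countP (fun c' => pvPos c' == t)) = 0 := by
      simp [List.countP_cons]
      omega
    simp [this]

lemma pvCnts_cons (q : List Char) (c : Char) (h1 : 71 ≤ c.toNat) (h2 : c.toNat ≤ 122) :
    pvCnts (c :: q) = (pvCnts q).set (pvPos c) ((pvCnts q).getD (pvPos c) 0 + 1) := by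
  have hpos : pvPos c < 26 := pvPos_lt c h1 h2
  apply List.ext_getElem
  · simp [pvCnts]
  intro t ht _
  simp only [pvCnts, List.length_map, List.length_range] at ht
  have hget : ∀ (p : List Char) (u : Nat) (hu : u < 26),
      (pvCnts p)[u]'(by rw [pvCnts_len]; exact hu) = ((p.countP (fun c => pvPos c == u)) : Int) := by
    intro p u hu
    simp [pvCnts]
  rw [hget (c :: q) t ht]
  by_cases he : t = pvPos c
  · subst he
    rw [List.getElem_set_self]
    · rw [List.getD_eq_getElem _ _ (by simp [pvCnts_len, hpos]), hget q _ hpos,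
        List.countP_cons]
      simp
  · rw [List.getElem_set_ne (by omega)]
    rw [hget q t ht, List.countP_cons]
    have : ((pvPos c == t) : Bool) = false := by
      simp only [beq_eq_false_iff_ne]
      omega
    simp [this]

lemma arr_eq (q : List Char) (hq : ∀ c ∈ q, 71 ≤ c.toNat ∧ c.toNat ≤ 122) :
    pvArr q = pvCnts q := by
  induction q using List.reverseRecOn with
  | nil => simp [pvArr, pvCnts_nil]
  | append_singleton q c ih =>
    have hc := hq c (by simp)
    have hsub : ∀ c' ∈ q, 71 ≤ c'.toNat ∧ c'.toNat ≤ 122 := fun c' h => hq c' (by simp [h])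
    calc pvArr (q ++ [c]) = pvStepA (pvArr q) c := by
          unfold pvArr; rw [List.foldl_append]; rfl
      _ = pvStepA (pvCnts q) c := by rw [ih hsub]
      _ = (pvCnts q).set (pvPos c) ((pvCnts q).getD (pvPos c) 0 + 1) :=
          stepA_char _ (pvCnts_len q) c hc.1 hc.2
      _ = pvCnts (q ++ [c]) := (pvCnts_append q c hc.1 hc.2).symm

-- pvGA counts the windows that pass A's check: one per nonempty extension of the prefix p
lemma pvGA_prefix (S : List Char) (hq : ∀ c ∈ S, 71 ≤ c.toNat ∧ c.toNat ≤ 122) :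
    ∀ (w p : List Char), (∀ x ∈ p, x ∈ S) → (∀ x ∈ w, x ∈ S) →
    pvGA (pvArr p) w =
      ((List.range w.length).map
        (fun t => if pvGoodA (pvCnts (p ++ w.take (t+1))) then (1:Int) else 0)).sum := by
  intro w
  induction w with
  | nil => intro p _ _; simp [pvGA]
  | cons c w ih =>
    intro p hp hw
    have hpc : ∀ x ∈ p ++ [c], x ∈ S := by
      intro x hx
      rcases List.mem_append.1 hx with h | h
      · exact hp x h
      · simp at h; subst h; exact hw x (by simp)
    have hqpc : ∀ x ∈ p ++ [c], 71 ≤ x.toNat ∧ x.toNat ≤ 122 := fun x hx => hq x (hpc x hx)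
    have h0 : pvArr (p ++ [c]) = pvStepA (pvArr p) c := by
      unfold pvArr; rw [List.foldl_append]; rfl
    have hstep : pvStepA (pvArr p) c = pvCnts (p ++ [c]) := by
      rw [← h0, arr_eq _ hqpc]
    show (if pvGoodA (pvStepA (pvArr p) c) then (1:Int) else 0) + pvGA (pvStepA (pvArr p) c) w = _
    rw [hstep, ← arr_eq _ hqpc,
      ih (p ++ [c]) hpc (fun x hx => hw x (by simp [hx]))]
    rw [show (c :: w).length = w.length + 1 from rfl, List.range_succ_eq_map]
    simp only [List.map_cons, List.map_map, List.sum_cons]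
    congr 1
    · rw [arr_eq _ hqpc]
      rfl
    apply congrArg List.sum
    apply List.map_congr_left
    intro t _
    simp [Function.comp, Nat.succ_eq_add_one, List.take_succ_cons, List.append_assoc]

lemma listsum_range (g : Nat → Int) (n : Nat) :
    ((List.range n).map g).sum = ∑ i ∈ Finset.range n, g i := by
  induction n with
  | zero => simp
  | succ n ih => rw [List.range_succ, Finset.sum_range_succ, List.map_append, List.sum_append, ih]; simp

lemma A_eq_rhs (s : String)
    (hq : ∀ c ∈ s.toList, 71 ≤ c.toNat ∧ c.toNat ≤ 122) :
    equalCountSubstrings s = pvRhs s.toList := by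
  rw [A_eq_sum]
  simp only [PySem.List.len_eq]
  rw [PySem.List.pyRange_zero_nat, List.foldl_map]
  rw [PySem.List.foldl_congr_mem _ _
    (fun (res : Int) (i : Nat) => res + pvGA (List.replicate 26 0) (s.toList.drop i)) _
    (fun acc i _ => by rw [Int.toNat_natCast])]
  rw [PySem.List.foldl_add, zero_add, listsum_range]
  unfold pvRhs
  apply Finset.sum_congr rfl
  intro i _
  rw [show List.replicate 26 (0:Int) = pvArr [] from rfl]
  rw [pvGA_prefix s.toList hq (s.toList.drop i) [] (by simp)
    (fun x hx => List.mem_of_mem_drop hx)]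
  rw [listsum_range]
  refine Finset.sum_congr (by rw [List.length_drop]) ?_
  intro t _
  simp only [List.nil_append]
  rfl

-- ---------- small array lemmas ----------

lemma set_getD_self (l : List Int) (t : Nat) (ht : t < l.length) :
    l.set t (l.getD t 0) = l := by
  apply List.ext_getElem (by simp)
  intro n hn _
  by_cases h : n = t
  · subst h
    rw [List.getElem_set_self, List.getD_eq_getElem _ _ ht]
  · rw [List.getElem_set_ne (by omega)]

lemma getD_set_self (l : List Int) (t : Nat) (ht : t < l.length) (e : Int) :
    (l.set t e).getD t 0 = e := by
  rw [List.getD_eq_getElem _ _ (by simp [ht]), List.getElem_set_self]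

lemma countP_set' (l : List Int) (t : Nat) (ht : t < l.length) (e : Int) (p : Int → Bool) :
    (l.set t e).countP p + (if p (l.getD t 0) then 1 else 0)
      = l.countP p + (if p e then 1 else 0) := by
  induction l generalizing t with
  | nil => simp at ht
  | cons x xs ih =>
    cases t with
    | zero =>
      rw [List.set_cons_zero, List.getD_cons_zero, List.countP_cons, List.countP_cons]
      omega
    | succ t' =>
      rw [List.set_cons_succ, List.getD_cons_succ, List.countP_cons, List.countP_cons]
      have := ih t' (by simpa using ht)
      omega

lemma sum_set' (l : List Int) (t : Nat) (ht : t < l.length) (e : Int) :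
    (l.set t e).sum + l.getD t 0 = l.sum + e := by
  induction l generalizing t with
  | nil => simp at ht
  | cons x xs ih =>
    cases t with
    | zero =>
      rw [List.set_cons_zero, List.getD_cons_zero, List.sum_cons, List.sum_cons]
      ring
    | succ t' =>
      rw [List.set_cons_succ, List.getD_cons_succ, List.sum_cons, List.sum_cons]
      have := ih t' (by simpa using ht)
      omega

lemma sum_pvCnts (q : List Char) (hq : ∀ c ∈ q, 71 ≤ c.toNat ∧ c.toNat ≤ 122) :
    (pvCnts q).sum = (q.length : Int) := by
  induction q using List.reverseRecOn with
  | nil => rw [pvCnts_nil]; simp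
  | append_singleton q c ih =>
    have hc := hq c (by simp)
    have hsub : ∀ c' ∈ q, 71 ≤ c'.toNat ∧ c'.toNat ≤ 122 := fun c' h => hq c' (by simp [h])
    have hpos : pvPos c < 26 := pvPos_lt c hc.1 hc.2
    rw [pvCnts_append q c hc.1 hc.2]
    have := sum_set' (pvCnts q) (pvPos c) (by rw [pvCnts_len]; exact hpos)
      ((pvCnts q).getD (pvPos c) 0 + 1)
    rw [ih hsub] at this
    simp only [List.length_append, List.length_cons, List.length_nil]
    push_cast
    omega

lemma pvCnts_nonneg (q : List Char) : ∀ x ∈ pvCnts q, 0 ≤ x := by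
  intro x hx
  simp only [pvCnts, List.mem_map, List.mem_range] at hx
  obtain ⟨t, -, rfl⟩ := hx
  positivity

-- ---------- B's counter maintenance ----------

lemma pvAddC_eq (f : Int) (q : List Char) (c : Char) (h1 : 71 ≤ c.toNat) (h2 : c.toNat ≤ 122) :
    pvAddC f (pvCnts q, pvDistC q, pvExactC q f) c
      = (pvCnts (q ++ [c]), pvDistC (q ++ [c]), pvExactC (q ++ [c]) f) := by
  have hpos : pvPos c < 26 := pvPos_lt c h1 h2
  have hlt : pvPos c < (pvCnts q).length := by rw [pvCnts_len]; exact hpos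
  simp only [pvAddC]
  rw [pyGet_class _ (pvCnts_len q) c h1 h2, pySet_class _ (pvCnts_len q) c h1 h2]
  set g : Int := (pvCnts q).getD (pvPos c) 0 with hg
  have hgn : 0 ≤ g := by
    rw [hg, getD_pvCnts q c h1 h2]
    positivity
  have hcnt : (pvCnts q).set (pvPos c) (g + 1) = pvCnts (q ++ [c]) :=
    (pvCnts_append q c h1 h2).symm
  have hcntP : ∀ p : Int → Bool,
      ((pvCnts (q ++ [c])).countP p : Int) + (if p g then 1 else 0)
        = ((pvCnts q).countP p : Int) + (if p (g + 1) then 1 else 0) := by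
    intro p
    have := countP_set' (pvCnts q) (pvPos c) hlt (g + 1) p
    rw [hcnt] at this
    split_ifs at this ⊢ <;> push_cast <;> omega
  refine Prod.ext ?_ (Prod.ext ?_ ?_)
  · exact hcnt
  · show (if (g + 1 == 1) = true then pvDistC q + 1 else pvDistC q) = pvDistC (q ++ [c])
    have hd := hcntP (fun x => decide (0 < x))
    unfold pvDistC
    by_cases hz : g = 0
    · rw [if_pos (by rw [hz]; rfl)]
      simp only [hz, decide_eq_true_eq] at hd
      rw [if_neg (by omega), if_pos (by omega)] at hd
      omega
    · rw [if_neg (by simpa using (by omega : ¬ g + 1 = 1))]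
      simp only [decide_eq_true_eq] at hd
      rw [if_pos (by omega), if_pos (by omega)] at hd
      omega
  · show (if (g + 1 == f) = true then pvExactC q f + 1
        else if (g + 1 == f + 1) = true then pvExactC q f - 1 else pvExactC q f)
        = pvExactC (q ++ [c]) f
    have he := hcntP (fun x => x == f)
    unfold pvExactC
    by_cases hf1 : g + 1 = f
    · rw [if_pos (by simpa using hf1)]
      rw [if_neg (by simpa using (by omega : ¬ g = f)), if_pos (by simpa using hf1)] at he
      omega
    · rw [if_neg (by simpa using hf1)]
      by_cases hf2 : g = f
      · rw [if_pos (by simpa using (by omega : g + 1 = f + 1))]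
        rw [if_pos (by simpa using hf2), if_neg (by simpa using hf1)] at he
        omega
      · rw [if_neg (by simpa using (by omega : ¬ g + 1 = f + 1))]
        rw [if_neg (by simpa using hf2), if_neg (by simpa using hf1)] at he
        omega

lemma pvRemC_eq (f : Int) (mid : List Char) (o : Char) (h1 : 71 ≤ o.toNat) (h2 : o.toNat ≤ 122) :
    pvRemC f (pvCnts (o :: mid), pvDistC (o :: mid), pvExactC (o :: mid) f) o
      = (pvCnts mid, pvDistC mid, pvExactC mid f) := by
  have hpos : pvPos o < 26 := pvPos_lt o h1 h2
  have hlt : pvPos o < (pvCnts mid).length := by rw [pvCnts_len]; exact hpos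
  simp only [pvRemC]
  rw [pyGet_class _ (pvCnts_len (o :: mid)) o h1 h2, pySet_class _ (pvCnts_len (o :: mid)) o h1 h2]
  set g : Int := (pvCnts mid).getD (pvPos o) 0 with hg
  have hgn : 0 ≤ g := by
    rw [hg, getD_pvCnts mid o h1 h2]
    positivity
  have hcons : pvCnts (o :: mid) = (pvCnts mid).set (pvPos o) (g + 1) := pvCnts_cons mid o h1 h2
  have hv : (pvCnts (o :: mid)).getD (pvPos o) 0 = g + 1 := by
    rw [hcons, getD_set_self _ _ hlt]
  have hcntP : ∀ p : Int → Bool,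
      ((pvCnts (o :: mid)).countP p : Int) + (if p g then 1 else 0)
        = ((pvCnts mid).countP p : Int) + (if p (g + 1) then 1 else 0) := by
    intro p
    have := countP_set' (pvCnts mid) (pvPos o) hlt (g + 1) p
    rw [← hcons] at this
    split_ifs at this ⊢ <;> push_cast <;> omega
  refine Prod.ext ?_ (Prod.ext ?_ ?_)
  · show (pvCnts (o :: mid)).set (pvPos o) ((pvCnts (o :: mid)).getD (pvPos o) 0 - 1) = pvCnts mid
    rw [hv, hcons, List.set_set, show g + 1 - 1 = g by ring, hg, set_getD_self _ _ hlt]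
  · show (if ((pvCnts (o :: mid)).getD (pvPos o) 0 == 1) = true then pvDistC (o :: mid) - 1 else pvDistC (o :: mid)) = pvDistC mid
    rw [hv]
    have hd := hcntP (fun x => decide (0 < x))
    unfold pvDistC
    by_cases hz : g = 0
    · rw [if_pos (by rw [hz]; rfl)]
      simp only [hz, decide_eq_true_eq] at hd
      rw [if_neg (by omega), if_pos (by omega)] at hd
      omega
    · rw [if_neg (by simpa using (by omega : ¬ g + 1 = 1))]
      simp only [decide_eq_true_eq] at hd
      rw [if_pos (by omega), if_pos (by omega)] at hd
      omega
  · show (if ((pvCnts (o :: mid)).getD (pvPos o) 0 == f) = true then pvExactC (o :: mid) f - 1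
        else if ((pvCnts (o :: mid)).getD (pvPos o) 0 == f + 1) = true then pvExactC (o :: mid) f + 1
        else pvExactC (o :: mid) f) = pvExactC mid f
    rw [hv]
    have he := hcntP (fun x => x == f)
    unfold pvExactC
    by_cases hf1 : g + 1 = f
    · rw [if_pos (by simpa using hf1)]
      rw [if_neg (by simpa using (by omega : ¬ g = f)), if_pos (by simpa using hf1)] at he
      omega
    · rw [if_neg (by simpa using hf1)]
      by_cases hf2 : g = f
      · rw [if_pos (by simpa using (by omega : g + 1 = f + 1))]
        rw [if_pos (by simpa using hf2), if_neg (by simpa using hf1)] at he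
        omega
      · rw [if_neg (by simpa using (by omega : ¬ g + 1 = f + 1))]
        rw [if_neg (by simpa using hf2), if_neg (by simpa using hf1)] at he
        omega

lemma addC_fold (f : Int) (hf : f ≠ 0) (q : List Char)
    (hq : ∀ c ∈ q, 71 ≤ c.toNat ∧ c.toNat ≤ 122) :
    q.foldl (pvAddC f) (List.replicate 26 (0 : Int), 0, 0)
      = (pvCnts q, pvDistC q, pvExactC q f) := by
  induction q using List.reverseRecOn with
  | nil =>
    rw [List.foldl_nil, pvCnts_nil]
    refine Prod.ext rfl (Prod.ext ?_ ?_)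
    · show (0 : Int) = pvDistC []
      unfold pvDistC
      rw [pvCnts_nil, List.countP_replicate]
      norm_num
    · show (0 : Int) = pvExactC [] f
      unfold pvExactC
      rw [pvCnts_nil, List.countP_replicate, if_neg (by simpa using (by omega : ¬ (0:Int) = f))]
      norm_num
  | append_singleton q c ih =>
    have hc := hq c (by simp)
    have hsub : ∀ c' ∈ q, 71 ≤ c'.toNat ∧ c'.toNat ≤ 122 := fun c' h => hq c' (by simp [h])
    rw [List.foldl_append, ih hsub, List.foldl_cons, List.foldl_nil,
      pvAddC_eq f q c hc.1 hc.2]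

-- ---------- the (k, f) pass of B counts windows passing pvQb ----------

lemma slideB_step (cs : List Char) (L' : Nat) (i : Nat) (hi : 1 ≤ i)
    (hiL : i + (L'+1) ≤ cs.length)
    (hq : ∀ c ∈ cs, 71 ≤ c.toNat ∧ c.toNat ≤ 122) (k f : Int) (r : Int) :
    pvSlideStepB cs (((L'+1) : Nat) : Int) k f
        (pvCnts (pvWin cs (i-1) (L'+1)), pvDistC (pvWin cs (i-1) (L'+1)),
          pvExactC (pvWin cs (i-1) (L'+1)) f, r) (i : Int)
      = (pvCnts (pvWin cs i (L'+1)), pvDistC (pvWin cs i (L'+1)),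
          pvExactC (pvWin cs i (L'+1)) f,
          if pvQb (pvWin cs i (L'+1)) k f then r + 1 else r) := by
  have hi1 : i - 1 < cs.length := by omega
  have hiL' : i + L' < cs.length := by omega
  have ho' : PySem.List.pyGetD cs ((i:Int) - 1) ' ' = cs[i-1]'hi1 := by
    rw [show (i:Int) - 1 = ((i-1 : Nat) : Int) by omega, PySem.List.pyGetD_natCast,
      List.getD_eq_getElem cs ' ' hi1]
  have hc' : PySem.List.pyGetD cs ((i:Int) + (((L'+1) : Nat) : Int) - 1) ' ' = cs[i+L']'hiL' := by
    rw [show (i:Int) + (((L'+1) : Nat) : Int) - 1 = ((i + L' : Nat) : Int) by push_cast; ring,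
      PySem.List.pyGetD_natCast, List.getD_eq_getElem cs ' ' hiL']
  set o : Char := cs[i-1]'hi1 with hodef
  set c : Char := cs[i+L']'hiL' with hcdef
  set mid : List Char := (cs.drop i).take L' with hmiddef
  have hbo := hq o (by rw [hodef]; exact List.getElem_mem _)
  have hbc := hq c (by rw [hcdef]; exact List.getElem_mem _)
  have hwin_prev : pvWin cs (i-1) (L'+1) = o :: mid := by
    unfold pvWin
    rw [List.drop_eq_getElem_cons hi1, show i - 1 + 1 = i by omega, List.take_succ_cons]
  have hwin_cur : pvWin cs i (L'+1) = mid ++ [c] := by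
    unfold pvWin
    rw [List.take_add_one]
    congr 1
    rw [List.getElem?_drop, List.getElem?_eq_getElem hiL']
    rfl
  rw [hwin_prev, hwin_cur]
  simp only [pvSlideStepB, ho', hc']
  rw [show ((pvCnts (o :: mid), pvDistC (o :: mid), pvExactC (o :: mid) f, r).1,
      (pvCnts (o :: mid), pvDistC (o :: mid), pvExactC (o :: mid) f, r).2.1,
      (pvCnts (o :: mid), pvDistC (o :: mid), pvExactC (o :: mid) f, r).2.2.1)
      = (pvCnts (o :: mid), pvDistC (o :: mid), pvExactC (o :: mid) f) from rfl]
  rw [pvRemC_eq f mid o hbo.1 hbo.2, pvAddC_eq f mid c hbc.1 hbc.2]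
  rfl

lemma slideB_fold (cs : List Char) (Ln : Nat) (hLn : 1 ≤ Ln) (hle : Ln ≤ cs.length)
    (hq : ∀ c ∈ cs, 71 ≤ c.toNat ∧ c.toNat ≤ 122) (k f : Int) (r0 : Int) :
    ∀ j, j ≤ cs.length - Ln →
      (PySem.List.pyRange 1 ((j : Int) + 1)).foldl (pvSlideStepB cs (Ln : Int) k f)
          (pvCnts (pvWin cs 0 Ln), pvDistC (pvWin cs 0 Ln), pvExactC (pvWin cs 0 Ln) f, r0)
        = (pvCnts (pvWin cs j Ln), pvDistC (pvWin cs j Ln), pvExactC (pvWin cs j Ln) f,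
            r0 + ∑ t ∈ Finset.range j, (if pvQb (pvWin cs (t+1) Ln) k f then (1:Int) else 0)) := by
  obtain ⟨L', rfl⟩ : ∃ L', Ln = L' + 1 := ⟨Ln - 1, by omega⟩
  intro j
  induction j with
  | zero =>
    intro _
    rw [show ((0:Nat):Int) + 1 = 1 by norm_num, PySem.List.pyRange_one_eq_nil (le_refl 1)]
    simp
  | succ j ih =>
    intro hj
    have hsplit : PySem.List.pyRange 1 (((j+1 : Nat):Int) + 1)
        = PySem.List.pyRange 1 ((j:Int) + 1) ++ [(j:Int) + 1] := by
      rw [show (((j+1:Nat):Int) + 1) = ((j:Int) + 1) + 1 by push_cast; ring]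
      exact PySem.List.pyRange_one_succ_right (by omega)
    rw [hsplit, List.foldl_append, ih (by omega), List.foldl_cons, List.foldl_nil]
    rw [show ((j:Int) + 1) = ((j+1 : Nat) : Int) by push_cast; ring]
    have hstep := slideB_step cs L' (j+1) (by omega) (by omega) hq k f
      (r0 + ∑ t ∈ Finset.range j, (if pvQb (pvWin cs (t+1) (L'+1)) k f then (1:Int) else 0))
    simp only [Nat.add_sub_cancel] at hstep
    rw [hstep]
    refine congrArg _ ?_
    refine congrArg _ ?_
    refine congrArg _ ?_
    rw [Finset.sum_range_succ]
    split_ifs <;> ring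

lemma pvInnerB_spec (cs : List Char) (hq : ∀ c ∈ cs, 71 ≤ c.toNat ∧ c.toNat ≤ 122)
    (k f : Nat) (hk : 1 ≤ k) (hf : 1 ≤ f)
    (hL : k * f ≤ cs.length) (res : Int) :
    pvInnerB cs (k : Int) (f : Int) res
      = res + ∑ i ∈ Finset.range (cs.length - k*f + 1),
          (if pvQb (pvWin cs i (k*f)) (k:Int) (f:Int) then (1:Int) else 0) := by
  have hLn : 1 ≤ k * f := Nat.mul_pos hk hf
  unfold pvInnerB
  simp only [PySem.List.len_eq]
  rw [show ((k:Int)) * ((f:Int)) = ((k*f : Nat) : Int) by push_cast; ring]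
  have hlen : ((cs.take (k*f)).length : Int) = ((k*f : Nat) : Int) := by
    rw [List.length_take]
    congr 1
    omega
  have hb1 : (PySem.List.pyRange 0 ((k*f : Nat):Int)).foldl
      (pvBuildStepB cs (f : Int)) (List.replicate 26 (0:Int), 0, 0)
      = (cs.take (k*f)).foldl (pvAddC (f : Int)) (List.replicate 26 (0:Int), 0, 0) := by
    rw [← hlen]
    rw [PySem.List.foldl_congr_mem _ _
      (fun (st : List Int × Int × Int) (r : Int) => pvAddC (f:Int) st (PySem.List.pyGetD (cs.take (k*f)) r ' ')) _ ?_]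
    · exact PySem.List.foldl_pyRange_zero_pyGetD' (cs.take (k*f)) ' ' (pvAddC (f:Int)) _
    · intro acc r hr
      obtain ⟨hr0, hr1⟩ := PySem.List.mem_pyRange_one.1 hr
      rw [hlen] at hr1
      show pvAddC (f:Int) acc (PySem.List.pyGetD cs r ' ') = _
      have hgeq : PySem.List.pyGetD cs r ' ' = PySem.List.pyGetD (cs.take (k*f)) r ' ' := by
        rw [PySem.List.pyGetD_eq_getElem cs ' ' hr0 (by omega),
          PySem.List.pyGetD_eq_getElem (cs.take (k*f)) ' ' hr0 (by rw [hlen]; omega)]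
        exact List.getElem_take.symm
      rw [hgeq]
  rw [hb1]
  have hw0 : pvWin cs 0 (k*f) = cs.take (k*f) := by
    unfold pvWin
    rw [List.drop_zero]
  have hsubq : ∀ c ∈ cs.take (k*f), 71 ≤ c.toNat ∧ c.toNat ≤ 122 :=
    fun c hc => hq c (List.mem_of_mem_take hc)
  rw [addC_fold (f:Int) (by omega) (cs.take (k*f)) hsubq, ← hw0]
  dsimp only
  rw [show ((cs.length : Int) - ((k*f : Nat):Int) + 1) = ((cs.length - k*f : Nat) : Int) + 1 by omega]
  rw [slideB_fold cs (k*f) hLn hL hq (k:Int) (f:Int) _ (cs.length - k*f) (le_refl _)]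
  dsimp only
  rw [show ((pvDistC (pvWin cs 0 (k*f)) == (k:Int) && pvExactC (pvWin cs 0 (k*f)) (f:Int) == (k:Int)))
      = pvQb (pvWin cs 0 (k*f)) (k:Int) (f:Int) from rfl]
  rw [Finset.sum_range_succ']
  split_ifs <;> ring

lemma sum_Icc_one (h : Nat → Int) (q : Nat) :
    ∑ x ∈ Finset.Icc 1 q, h x = ∑ t ∈ Finset.range q, h (t+1) := by
  induction q with
  | zero => simp
  | succ q ih =>
    rw [Finset.sum_Icc_succ_top (by omega), Finset.sum_range_succ, ih]

lemma alt_eq_lhs (s : String) (hq : ∀ c ∈ s.toList, 71 ≤ c.toNat ∧ c.toNat ≤ 122) :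
    equalCountSubstrings_alt s = pvLhs s.toList := by
  unfold equalCountSubstrings_alt
  simp only [PySem.List.len_eq]
  have hinner : ∀ kk : Nat, 1 ≤ kk → ∀ r : Int,
      (PySem.List.pyRange 1 (PySem.Int.floordiv ((s.toList.length : Nat) : Int) ((kk:Nat):Int) + 1)).foldl
        (fun res f => pvInnerB s.toList ((kk:Nat):Int) f res) r
      = r + ∑ ff ∈ Finset.Icc 1 (s.toList.length / kk),
          ∑ i ∈ Finset.range (s.toList.length - kk*ff + 1),
            (if pvQb (pvWin s.toList i (kk*ff)) (kk:Int) (ff:Int) then (1:Int) else 0) := by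
    intro kk hk1 r
    have hflo : PySem.Int.floordiv ((s.toList.length : Nat) : Int) ((kk:Nat):Int)
        = ((s.toList.length / kk : Nat) : Int) := by
      show Int.fdiv _ _ = _
      rw [Int.fdiv_eq_ediv, if_pos (Or.inl (by positivity)), sub_zero, Int.natCast_div]
    rw [hflo]
    rw [PySem.List.foldl_congr_mem _ _
      (fun (acc : Int) (f : Int) => acc + ∑ i ∈ Finset.range (s.toList.length - kk * f.toNat + 1),
          (if pvQb (pvWin s.toList i (kk * f.toNat)) (kk:Int) ((f.toNat : Nat):Int) then (1:Int) else 0)) _ ?_]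
    · rw [PySem.List.foldl_add, PySem.List.pyRange_one,
        show ((((s.toList.length/kk : Nat):Int) + 1 - 1)).toNat = s.toList.length / kk by
          rw [add_sub_cancel_right, Int.toNat_natCast],
        List.map_map, listsum_range]
      rw [sum_Icc_one]
      congr 1
      apply Finset.sum_congr rfl
      intro t _
      simp only [Function.comp]
      rw [show ((1:Int) + (t:Int)).toNat = t + 1 by omega]
    · intro acc f hf
      obtain ⟨h1, h2⟩ := PySem.List.mem_pyRange_one.1 hf
      have hfe : f = ((f.toNat : Nat) : Int) := by omega
      have hf1 : 1 ≤ f.toNat := by omega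
      have hf2 : f.toNat ≤ s.toList.length / kk := by omega
      have hmul : kk * f.toNat ≤ s.toList.length := by
        have := (Nat.le_div_iff_mul_le (by omega : 0 < kk)).1 hf2
        rw [Nat.mul_comm]
        exact this
      rw [hfe, pvInnerB_spec s.toList hq kk f.toNat hk1 hf1 hmul]
      simp only [Int.toNat_natCast]
      rfl
  rw [PySem.List.foldl_congr_mem _ _
    (fun (acc : Int) (kI : Int) => acc
      + ∑ ff ∈ Finset.Icc 1 (s.toList.length / kI.toNat),
          ∑ i ∈ Finset.range (s.toList.length - kI.toNat*ff + 1),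
            (if pvQb (pvWin s.toList i (kI.toNat*ff)) ((kI.toNat:Nat):Int) (ff:Int) then (1:Int) else 0)) _ ?_]
  · rw [PySem.List.foldl_add, PySem.List.pyRange_one,
      show ((27:Int) - 1).toNat = 26 by decide, List.map_map, listsum_range, zero_add]
    unfold pvLhs
    rw [sum_Icc_one]
    apply Finset.sum_congr rfl
    intro t _
    simp only [Function.comp]
    rw [show ((1:Int) + (t:Int)).toNat = t + 1 by omega]
  · intro acc kI hkI
    obtain ⟨h1, h2⟩ := PySem.List.mem_pyRange_one.1 hkI
    have hke : kI = ((kI.toNat : Nat) : Int) := by omega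
    have hk1 : 1 ≤ kI.toNat := by omega
    rw [hke, hinner kI.toNat hk1]
    simp only [Int.toNat_natCast]
    rfl

-- ---------- the combinatorial core: each equal-count window is counted once, by (k, f) = (distinct, L/distinct) ----------

lemma nodup_all_eq {α : Type} (m : List α) (a : α) (hn : m.Nodup) (ha : a ∈ m)
    (he : ∀ x ∈ m, x = a) : m = [a] := by
  cases m with
  | nil => simp at ha
  | cons x t =>
    have hx : x = a := he x (by simp)
    cases t with
    | nil => simp [hx]
    | cons y u =>
      have hy : y = a := he y (by simp)
      subst hx hy
      simp at hn

lemma lenOne (l : List Int) :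
    (PySem.Set.len (PySem.Set.ofList l) == 1) = true ↔ l ≠ [] ∧ ∀ x ∈ l, ∀ y ∈ l, x = y := by
  unfold PySem.Set.len
  rw [beq_iff_eq]
  have hcast : ((PySem.Set.ofList l).length : Int) = 1 ↔ (PySem.Set.ofList l).length = 1 := by omega
  rw [hcast, List.length_eq_one_iff]
  constructor
  · rintro ⟨a, hal⟩
    have hmem : ∀ x, x ∈ l ↔ x = a := by
      intro x
      rw [← PySem.Set.mem_ofList l x, hal]
      simp
    have hane : a ∈ l := (hmem a).2 rfl
    exact ⟨fun h => by simp [h] at hane, fun x hx y hy => by rw [(hmem x).1 hx, (hmem y).1 hy]⟩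
  · rintro ⟨hne, hall⟩
    obtain ⟨c, hc⟩ := List.exists_mem_of_ne_nil l hne
    refine ⟨c, nodup_all_eq _ _ (PySem.Set.nodup_ofList l) ((PySem.Set.mem_ofList l c).2 hc) ?_⟩
    intro x hx
    exact hall x ((PySem.Set.mem_ofList l x).1 hx) c hc

lemma sum_all_pos_eq (l : List Int) (f0 : Int) (h0 : ∀ x ∈ l, 0 ≤ x)
    (he : ∀ x ∈ l, 0 < x → x = f0) :
    l.sum = f0 * ((l.countP (fun x => decide (0 < x))) : Int) := by
  induction l with
  | nil => simp
  | cons x t ih =>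
    have hx0 := h0 x (by simp)
    have iht := ih (fun y hy => h0 y (by simp [hy])) (fun y hy => he y (by simp [hy]))
    rw [List.sum_cons, List.countP_cons, iht]
    by_cases hp : 0 < x
    · rw [if_pos (by simpa using hp), he x (by simp) hp]
      push_cast
      ring
    · rw [if_neg (by simpa using hp)]
      have hx : x = 0 := by omega
      rw [hx, Nat.add_zero, zero_add]

lemma countP_eq_imp_all (l : List Int) (p q : Int → Bool)
    (himp : ∀ x ∈ l, p x = true → q x = true)
    (heq : l.countP p = l.countP q) : ∀ x ∈ l, q x = true → p x = true := by
  induction l with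
  | nil => simp
  | cons a t ih =>
    have hmono := List.countP_mono_left (l := t) (p := p) (q := q)
      (fun x hx => himp x (by simp [hx]))
    rw [List.countP_cons, List.countP_cons] at heq
    by_cases hpa : p a = true
    · have hqa := himp a (by simp) hpa
      rw [if_pos hpa, if_pos hqa] at heq
      have := ih (fun x hx => himp x (by simp [hx])) (by omega)
      intro x hx hq'
      rcases List.mem_cons.1 hx with rfl | hxt
      · exact hpa
      · exact this x hxt hq'
    · rw [if_neg hpa] at heq
      by_cases hqa : q a = true
      · rw [if_pos hqa] at heq
        omega
      · rw [if_neg hqa] at heq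
        have := ih (fun x hx => himp x (by simp [hx])) (by omega)
        intro x hx hq'
        rcases List.mem_cons.1 hx with rfl | hxt
        · exact absurd hq' hqa
        · exact this x hxt hq'

lemma key_window (w : List Char) (L : Nat) (hw : w.length = L) (hL : 1 ≤ L)
    (hq : ∀ c ∈ w, 71 ≤ c.toNat ∧ c.toNat ≤ 122) :
    ∑ k ∈ Finset.Icc 1 26,
        (if k ∣ L then (if pvQb w (k:Int) ((L/k : Nat) : Int) then (1:Int) else 0) else 0)
      = (if pvGoodA (pvCnts w) then (1:Int) else 0) := by
  set a : List Int := pvCnts w with hadef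
  have hnn : ∀ x ∈ a, 0 ≤ x := pvCnts_nonneg w
  have hsum : a.sum = (L : Int) := by rw [hadef, sum_pvCnts w hq, hw]
  set k0 : Nat := a.countP (fun x => decide (0 < x)) with hk0
  have hk0le : k0 ≤ 26 := by
    rw [hk0]
    calc a.countP _ ≤ a.length := List.countP_le_length
      _ = 26 := by rw [hadef]; exact pvCnts_len w
  set F : List Int := a.filter (fun x => decide (x > 0)) with hF
  have hFlen : F.length = k0 := by
    rw [hF, hk0, List.countP_eq_length_filter]
  have hFmem : ∀ x, x ∈ F ↔ x ∈ a ∧ 0 < x := by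
    intro x
    rw [hF, List.mem_filter]
    simp
  have hgood : pvGoodA a = true ↔ F ≠ [] ∧ ∀ x ∈ F, ∀ y ∈ F, x = y := by
    unfold pvGoodA
    rw [lenOne]
  by_cases hg : pvGoodA a = true
  · rw [hg, if_pos rfl]
    obtain ⟨hne, hall⟩ := hgood.1 hg
    set f0 : Int := F.head hne with hf0
    have hf0F : f0 ∈ F := by rw [hf0]; exact List.head_mem hne
    have hf0pos : 0 < f0 := ((hFmem f0).1 hf0F).2
    have hposall : ∀ x ∈ a, 0 < x → x = f0 := by
      intro x hx hp
      exact hall x ((hFmem x).2 ⟨hx, hp⟩) f0 hf0F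
    have hsum2 : (L : Int) = f0 * (k0 : Int) := by
      rw [← hsum, sum_all_pos_eq a f0 hnn hposall, hk0]
    have hk0pos : 1 ≤ k0 := by
      by_contra h
      have : k0 = 0 := by omega
      rw [this] at hsum2
      simp at hsum2
      omega
    obtain ⟨fn, hfn⟩ : ∃ fn : Nat, f0 = (fn : Int) := ⟨f0.toNat, by omega⟩
    have hLkf : L = k0 * fn := by
      have : (L : Int) = ((k0 * fn : Nat) : Int) := by
        rw [hsum2, hfn]; push_cast; ring
      exact_mod_cast this
    have hdvd : k0 ∣ L := ⟨fn, hLkf⟩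
    have hLdiv : L / k0 = fn := by
      rw [hLkf, Nat.mul_div_cancel_left _ (by omega)]
    have hfn1 : 1 ≤ fn := by omega
    have hQ : pvQb w (k0 : Int) ((fn : Nat) : Int) = true := by
      unfold pvQb pvDistC pvExactC
      rw [Bool.and_eq_true]
      constructor
      · rw [← hadef, ← hk0]
        exact beq_self_eq_true _
      · rw [← hadef, beq_iff_eq]
        congr 1
        rw [hk0]
        apply List.countP_congr
        intro x hx
        constructor
        · intro hxf
          have : x = (fn : Int) := by simpa using hxf
          simp only [decide_eq_true_eq]
          omega
        · intro hxp
          have hp : 0 < x := by simpa using hxp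
          have := hposall x hx hp
          simp only [beq_iff_eq]
          omega
    rw [Finset.sum_eq_single_of_mem k0 (Finset.mem_Icc.2 ⟨hk0pos, hk0le⟩)]
    · rw [if_pos hdvd, hLdiv, hQ, if_pos rfl]
    · intro k hkm hkne
      by_cases hdk : k ∣ L
      · rw [if_pos hdk]
        by_cases hQk : pvQb w (k : Int) ((L/k : Nat) : Int) = true
        · exfalso
          apply hkne
          unfold pvQb at hQk
          rw [Bool.and_eq_true] at hQk
          have hb1 := hQk.1
          unfold pvDistC at hb1
          rw [beq_iff_eq, ← hadef, ← hk0] at hb1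
          exact_mod_cast hb1.symm
        · rw [Bool.not_eq_true] at hQk
          rw [hQk]
          simp
      · rw [if_neg hdk]
  · rw [Bool.not_eq_true] at hg
    rw [hg]
    simp only [Bool.false_eq_true, if_false]
    apply Finset.sum_eq_zero
    intro k hk
    obtain ⟨hk1, -⟩ := Finset.mem_Icc.1 hk
    by_cases hdk : k ∣ L
    · rw [if_pos hdk]
      by_cases hQk : pvQb w (k : Int) ((L/k : Nat) : Int) = true
      · exfalso
        unfold pvQb pvDistC pvExactC at hQk
        rw [Bool.and_eq_true, beq_iff_eq, beq_iff_eq, ← hadef] at hQk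
        obtain ⟨hb1, hb2⟩ := hQk
        set fq : Nat := L / k with hfq
        have hfq1 : 1 ≤ fq := by
          rw [hfq]
          have hkL : k ≤ L := Nat.le_of_dvd (by omega) hdk
          exact (Nat.le_div_iff_mul_le (by omega)).2 (by omega)
        have hcnteq : a.countP (fun x => x == ((fq : Nat) : Int)) = a.countP (fun x => decide (0 < x)) := by
          have e1 : a.countP (fun x => x == ((fq : Nat) : Int)) = k := by exact_mod_cast hb2
          have e2 : a.countP (fun x => decide (0 < x)) = k := by exact_mod_cast hb1
          rw [e1, e2]
        have himp : ∀ x ∈ a, (x == ((fq : Nat) : Int)) = true → (decide (0 < x)) = true := by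
          intro x _ hx
          have : x = ((fq : Nat) : Int) := by simpa using hx
          simp only [decide_eq_true_eq]
          omega
        have hrev := countP_eq_imp_all a _ _ himp hcnteq
        have hposf : ∀ x ∈ a, 0 < x → x = ((fq : Nat) : Int) := by
          intro x hx hp
          have := hrev x hx (by simpa using hp)
          simpa using this
        have hFne : F ≠ [] := by
          intro h0
          have hk00 : k0 = 0 := by rw [← hFlen, h0]; rfl
          rw [← hk0, hk00] at hb1
          have : k = 0 := by exact_mod_cast hb1.symm
          omega
        have : pvGoodA a = true := by
          rw [hgood]
          refine ⟨hFne, fun x hx y hy => ?_⟩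
          have hx' := (hFmem x).1 hx
          have hy' := (hFmem y).1 hy
          rw [hposf x hx'.1 hx'.2, hposf y hy'.1 hy'.2]
        rw [this] at hg
        exact Bool.noConfusion hg
      · rw [Bool.not_eq_true] at hQk
        rw [hQk]
        simp
    · rw [if_neg hdk]

-- ---------- sum plumbing ----------

lemma sumf_to_sumL (m k : Nat) (hk : 1 ≤ k) (q : Nat → Int) :
    ∑ f ∈ Finset.Icc 1 (m / k), q f
      = ∑ L ∈ Finset.Icc 1 m, (if k ∣ L then q (L / k) else 0) := by
  induction m with
  | zero => simp
  | succ m ih =>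
    by_cases hdvd : k ∣ (m+1)
    · have hdiv : (m+1)/k = m/k + 1 := by rw [Nat.succ_div, if_pos hdvd]
      rw [hdiv, Finset.sum_Icc_succ_top (Nat.le_add_left 1 (m/k)), ih,
        Finset.sum_Icc_succ_top (Nat.le_add_left 1 m), if_pos hdvd, hdiv]
    · have hdiv : (m+1)/k = m/k := by rw [Nat.succ_div, if_neg hdvd, add_zero]
      rw [hdiv, ih, Finset.sum_Icc_succ_top (Nat.le_add_left 1 m), if_neg hdvd, add_zero]

lemma sum_range_extend (m n : Nat) (hmn : m ≤ n) (h : Nat → Int) :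
    ∑ i ∈ Finset.range m, h i = ∑ i ∈ Finset.range n, (if i < m then h i else 0) := by
  have h1 : ∑ i ∈ Finset.range m, h i = ∑ i ∈ Finset.range m, (if i < m then h i else 0) :=
    Finset.sum_congr rfl (fun i hi => (if_pos (Finset.mem_range.1 hi)).symm)
  rw [h1]
  apply Finset.sum_subset
  · intro x hx
    exact Finset.mem_range.2 (lt_of_lt_of_le (Finset.mem_range.1 hx) hmn)
  · intro x _ hx
    rw [if_neg (fun hlt => hx (Finset.mem_range.2 hlt))]

lemma triangle_swap (n : Nat) (g : Nat → Nat → Int) :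
    ∑ t ∈ Finset.range n, ∑ i ∈ Finset.range (n - t), g t i
      = ∑ i ∈ Finset.range n, ∑ t ∈ Finset.range (n - i), g t i := by
  have e1 : ∑ t ∈ Finset.range n, ∑ i ∈ Finset.range (n - t), g t i
      = ∑ t ∈ Finset.range n, ∑ i ∈ Finset.range n, (if i < n - t then g t i else 0) :=
    Finset.sum_congr rfl (fun t _ => sum_range_extend _ n (Nat.sub_le _ _) _)
  have e2 : ∑ i ∈ Finset.range n, ∑ t ∈ Finset.range (n - i), g t i
      = ∑ i ∈ Finset.range n, ∑ t ∈ Finset.range n, (if t < n - i then g t i else 0) :=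
    Finset.sum_congr rfl (fun i _ => sum_range_extend _ n (Nat.sub_le _ _) _)
  rw [e1, e2, Finset.sum_comm]
  apply Finset.sum_congr rfl
  intro i _
  apply Finset.sum_congr rfl
  intro t _
  by_cases h : t < n - i
  · rw [if_pos (by omega), if_pos h]
  · rw [if_neg (by omega), if_neg h]

lemma lhs_eq_rhs (cs : List Char)
    (hq : ∀ c ∈ cs, 71 ≤ c.toNat ∧ c.toNat ≤ 122) :
    pvLhs cs = pvRhs cs := by
  unfold pvLhs pvRhs
  have step1 : ∀ k ∈ Finset.Icc 1 26,
      (∑ f ∈ Finset.Icc 1 (cs.length / k), ∑ i ∈ Finset.range (cs.length - k*f + 1),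
        (if pvQb (pvWin cs i (k*f)) (k:Int) (f:Int) then (1:Int) else 0))
      = ∑ L ∈ Finset.Icc 1 cs.length,
          (if k ∣ L then ∑ i ∈ Finset.range (cs.length - L + 1),
            (if pvQb (pvWin cs i L) (k:Int) ((L/k : Nat):Int) then (1:Int) else 0) else 0) := by
    intro k hk
    obtain ⟨hk1, -⟩ := Finset.mem_Icc.1 hk
    rw [sumf_to_sumL cs.length k hk1]
    apply Finset.sum_congr rfl
    intro L _
    by_cases hdk : k ∣ L
    · rw [if_pos hdk, if_pos hdk, Nat.mul_div_cancel' hdk]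
    · rw [if_neg hdk, if_neg hdk]
  rw [Finset.sum_congr rfl step1, Finset.sum_comm]
  have step2 : ∀ L ∈ Finset.Icc 1 cs.length,
      (∑ k ∈ Finset.Icc 1 26, (if k ∣ L then ∑ i ∈ Finset.range (cs.length - L + 1),
          (if pvQb (pvWin cs i L) (k:Int) ((L/k : Nat):Int) then (1:Int) else 0) else 0))
      = ∑ i ∈ Finset.range (cs.length - L + 1),
          (if pvGoodA (pvCnts (pvWin cs i L)) then (1:Int) else 0) := by
    intro L hL
    obtain ⟨hL1, hL2⟩ := Finset.mem_Icc.1 hL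
    have e : ∀ k, (if k ∣ L then ∑ i ∈ Finset.range (cs.length - L + 1),
          (if pvQb (pvWin cs i L) (k:Int) ((L/k : Nat):Int) then (1:Int) else 0) else 0)
        = ∑ i ∈ Finset.range (cs.length - L + 1),
            (if k ∣ L then (if pvQb (pvWin cs i L) (k:Int) ((L/k : Nat):Int) then (1:Int) else 0) else 0) := by
      intro k
      by_cases hdk : k ∣ L
      · rw [if_pos hdk]
        exact Finset.sum_congr rfl (fun i _ => (if_pos hdk).symm)
      · rw [if_neg hdk]
        symm
        apply Finset.sum_eq_zero
        intro i _
        rw [if_neg hdk]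
    rw [Finset.sum_congr rfl (fun k _ => e k), Finset.sum_comm]
    apply Finset.sum_congr rfl
    intro i hi
    have hi' := Finset.mem_range.1 hi
    refine key_window (pvWin cs i L) L ?_ hL1 ?_
    · unfold pvWin
      rw [List.length_take, List.length_drop]
      omega
    · exact fun c hc => hq c (List.mem_of_mem_drop (List.mem_of_mem_take hc))
  rw [Finset.sum_congr rfl step2, sum_Icc_one]
  have e3 : ∀ t ∈ Finset.range cs.length,
      (∑ i ∈ Finset.range (cs.length - (t+1) + 1), (if pvGoodA (pvCnts (pvWin cs i (t+1))) then (1:Int) else 0))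
      = ∑ i ∈ Finset.range (cs.length - t), (if pvGoodA (pvCnts (pvWin cs i (t+1))) then (1:Int) else 0) := by
    intro t ht
    have := Finset.mem_range.1 ht
    congr 1
    congr 1
    omega
  rw [Finset.sum_congr rfl e3]
  exact triangle_swap cs.length (fun t i => if pvGoodA (pvCnts (pvWin cs i (t+1))) then (1:Int) else 0)

-- ===== VERDICT (by name: the statement is the Claim_ definition above) =====
theorem equalCountSubstrings_spec : Claim_equal_equalCountSubstrings := by
  intro s _ hpre
  have hq := pre_bounds s hpre
  show equalCountSubstrings s = equalCountSubstrings_alt s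
  rw [A_eq_rhs s hq, alt_eq_lhs s hq, lhs_eq_rhs s.toList hq]
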